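-- pv_equiv track=rewrite | github.com/oocheol/CODE-Practice | 연습문제/프로그래머스/kakao 2021/kakao 1.py | solution
-- ===== SOURCE A (Python) =====
-- def solution(input_id):
--     temp_id = []
--     # 1,2 단계
--     for s in input_id :
--         if s.isalnum() :  # 알파벳 & 숫자판별
--             temp_id.append(s.lower())
--         elif s == '-' or s == '_' or s == '.':
--             temp_id.append(s.lower())
--     new_id = ''.join(temp_id)
--
--     # 3단계
--     for x in range(len(temp_id)+1,0,-1) :
--         new_id = new_id.replace("."*x,".")
--
--     # 4단계
--     if len(new_id) > 0 :
--         if new_id[0] == "." or new_id[-1] == "." :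
--             new_id = new_id.strip('.')
--
--         if len(new_id) == 0 :
--             new_id = 'a'
--
--     if len(new_id) == 0 :
--         new_id = 'a'
--
--     # 6단계
--     if len(new_id) >= 16 :
--         new_id = new_id[:15]
--
--         if new_id[-1] == "." :
--             new_id = new_id.strip('.')
--
--     # 7단계
--     if len(new_id) <= 2 :
--         while len(new_id) < 3 :
--             new_id = new_id + new_id[-1]
--
--
--     return new_id
-- ===== SOURCE B (Python) =====
-- def solution(input_id):
--     out = []
--     # one pass: filter/lower and collapse dots (never start with a dot, never two in a row)
--     for s in input_id:
--         if s.isalnum() or s in '-_.':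
--             c = s.lower()
--             if c == '.' and (not out or out[-1] == '.'):
--                 continue
--             out.append(c)
--     if out and out[-1] == '.':
--         out.pop()
--     if not out:
--         out = ['a']
--     out = out[:15]
--     if out[-1] == '.':
--         out.pop()
--     while len(out) < 3:
--         out.append(out[-1])
--     return ''.join(out)
-- ===== Notes on version B (the rewrite author's own statement) =====
-- stated objective: faster
-- what changed: Replaces A's filter pass plus quadratic dot-collapse loop (len(temp_id)+1 string.replace passes) with a single pass that filters, lowers and collapses/drops dots on the fly, then pops a trailing dot instead of two-sided strips.
import Mathlib
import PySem

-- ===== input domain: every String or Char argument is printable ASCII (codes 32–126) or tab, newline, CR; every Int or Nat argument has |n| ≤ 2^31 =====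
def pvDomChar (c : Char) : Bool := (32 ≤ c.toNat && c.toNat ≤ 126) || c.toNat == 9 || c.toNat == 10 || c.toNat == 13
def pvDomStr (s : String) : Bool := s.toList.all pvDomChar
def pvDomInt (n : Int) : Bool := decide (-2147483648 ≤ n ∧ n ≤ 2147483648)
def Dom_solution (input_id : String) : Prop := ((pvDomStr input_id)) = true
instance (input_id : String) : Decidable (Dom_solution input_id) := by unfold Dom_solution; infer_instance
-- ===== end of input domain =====

-- B fuses A's filter pass and its quadratic dot-collapse replace loop into one pass (objective: faster).

-- ===== PORT A =====
-- body of A's first for-loop (append the lowered char if alnum, elif '-'/'_'/'.')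
def aFilterStep (acc : List Char) (s : Char) : List Char :=
  if PySem.Chars.isalnum s then acc ++ [PySem.Chars.lowerChar s]
  else if s = '-' ∨ s = '_' ∨ s = '.' then acc ++ [PySem.Chars.lowerChar s]
  else acc

-- body of A's step-3 loop: new_id = new_id.replace("."*x, ".")
def aReplStep (nid : List Char) (x : Int) : List Char :=
  PySem.Chars.replace nid (List.replicate x.toNat '.') ['.']

-- A's step-7 while loop; new_id[-1] read with pyGetD (the empty list, where Python would raise, is unreachable there)
def padA (nid : List Char) : List Char :=
  if nid.length < 3 then padA (nid ++ [PySem.List.pyGetD nid (-1) 'a']) else nid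
termination_by 3 - nid.length
decreasing_by simp; omega

def solution (input_id : String) : String :=
  let temp_id := input_id.toList.foldl aFilterStep []
  let new_id := PySem.Chars.join [] (temp_id.map (fun c => [c]))
  let new_id := (PySem.List.pyRange ((temp_id.length : Int) + 1) 0 (-1)).foldl aReplStep new_id
  let new_id :=
    if new_id.length > 0 then
      let new_id :=
        if PySem.List.pyGetD new_id 0 'a' = '.' ∨ PySem.List.pyGetD new_id (-1) 'a' = '.' then
          PySem.Chars.stripChars new_id ['.']
        else new_id
      if new_id.length = 0 then ['a'] else new_id
    else new_id
  let new_id := if new_id.length = 0 then ['a'] else new_id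
  let new_id :=
    if new_id.length ≥ 16 then
      let new_id := PySem.Chars.slice new_id none (some 15)
      if PySem.List.pyGetD new_id (-1) 'a' = '.' then PySem.Chars.stripChars new_id ['.'] else new_id
    else new_id
  let new_id := if new_id.length ≤ 2 then padA new_id else new_id
  String.ofList new_id

-- ===== PORT B =====
-- body of B's single pass: filter/lower, and skip a '.' that would start the id or follow a '.'
def bStep (out : List Char) (s : Char) : List Char :=
  if PySem.Chars.isalnum s || PySem.Chars.isIn [s] ['-', '_', '.'] then
    let c := PySem.Chars.lowerChar s
    if c = '.' ∧ (out = [] ∨ PySem.List.pyGetD out (-1) 'a' = '.') then out else out ++ [c]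
  else out

-- B's final while loop (out[-1] as getLastD; empty, where Python would raise, is unreachable there)
def padB (out : List Char) : List Char :=
  if out.length < 3 then padB (out ++ [out.getLastD 'a']) else out
termination_by 3 - out.length
decreasing_by simp; omega

def solution_alt (input_id : String) : String :=
  let out := input_id.toList.foldl bStep []
  let out := if out ≠ [] ∧ out.getLast? = some '.' then out.dropLast else out
  let out := if out = [] then ['a'] else out
  let out := out.take 15
  let out := if out.getLast? = some '.' then out.dropLast else out
  String.ofList (padB out)

-- ===== PRECONDITION & SPEC =====
def Spec_solution (input_id : String) (out : String) : Prop := out = solution_alt input_id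
instance (input_id : String) (out : String) : Decidable (Spec_solution input_id out) := by unfold Spec_solution; infer_instance

-- ===== CLAIM (what is proved, stated in full; the proofs are below) =====
def Claim_equal_solution : Prop := ∀ (input_id : String), Dom_solution input_id → Spec_solution input_id (solution input_id)

-- ===== LEMMAS AND PROOFS =====


def gStep (acc : List Char) (c : Char) : List Char :=
  if c = '.' ∧ acc.getLast? = some '.' then acc else acc ++ [c]

def hStep (acc : List Char) (c : Char) : List Char :=
  if c = '.' ∧ (acc = [] ∨ acc.getLast? = some '.') then acc else acc ++ [c]


def replRef (o : Char) (os new : List Char) : List Char → List Char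
  | [] => []
  | c :: t =>
    if (o :: os).isPrefixOf (c :: t) then new ++ replRef o os new (t.drop os.length)
    else c :: replRef o os new t
termination_by l => l.length
decreasing_by
  · simp only [List.length_cons, List.length_drop]; omega
  · simp



theorem lastD_eq (l : List Char) : PySem.List.pyGetD l (-1) 'a' = l.getLastD 'a' := by
  cases l with
  | nil => decide
  | cons c t =>
    rw [PySem.List.pyGetD_neg_one (xs := c :: t) (h := by simp)]
    rw [List.getLastD_eq_getLast?, List.getLast?_eq_some_getLast (l := c :: t) (by simp)]
    rfl

theorem last_dot_iff (l : List Char) : PySem.List.pyGetD l (-1) 'a' = '.' ↔ l.getLast? = some '.' := by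
  rw [lastD_eq]
  cases h : l.getLast? with
  | none => rw [List.getLastD_eq_getLast?, h]; simp
  | some c => rw [List.getLastD_eq_getLast?, h]; simp

theorem headD_eq (l : List Char) (h : l ≠ []) :
    (PySem.List.pyGetD l 0 'a' = '.') ↔ l.head? = some '.' := by
  cases l with
  | nil => simp at h
  | cons c t => simp [PySem.List.pyGetD_zero_cons]

theorem isIn_singleton (c : Char) (l : List Char) : PySem.Chars.isIn [c] l = l.contains c := by
  rcases h : PySem.Chars.isIn [c] l with _ | _
  · rw [PySem.Chars.isIn_eq_false_iff, List.singleton_infix_iff] at h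
    simp [h]
  · rw [PySem.Chars.isIn_iff_infix, List.singleton_infix_iff] at h
    simp [h]

def keepL (s : Char) : Option Char :=
  if PySem.Chars.isalnum s then some (PySem.Chars.lowerChar s)
  else if s = '-' ∨ s = '_' ∨ s = '.' then some (PySem.Chars.lowerChar s)
  else none

theorem aFilterStep_eq (acc : List Char) (s : Char) : aFilterStep acc s = acc ++ (keepL s).toList := by
  unfold aFilterStep keepL; split_ifs <;> simp

theorem afold_eq (inp : List Char) : ∀ acc, inp.foldl aFilterStep acc = acc ++ inp.filterMap keepL := by
  induction inp with
  | nil => simp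
  | cons s t ih =>
    intro acc
    rw [List.foldl_cons, aFilterStep_eq, ih, List.filterMap_cons]
    cases h : keepL s <;> simp

theorem bStep_keep (out : List Char) (s : Char) :
    bStep out s = match keepL s with
      | some c => hStep out c
      | none => out := by
  unfold bStep keepL hStep
  rw [isIn_singleton]
  by_cases h1 : PySem.Chars.isalnum s
  · simp [h1, last_dot_iff]
  · by_cases h2 : s = '-' ∨ s = '_' ∨ s = '.'
    · have hc : List.contains ['-', '_', '.'] s = true := by
        rcases h2 with h | h | h <;> simp [h]
      simp [h1, h2, last_dot_iff]
    · have hm : s ∉ (['-', '_', '.'] : List Char) := by simpa using h2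
      simp [h1, h2, List.contains_eq_mem, hm]

theorem bfold_eq (inp : List Char) : ∀ acc, inp.foldl bStep acc = (inp.filterMap keepL).foldl hStep acc := by
  induction inp with
  | nil => simp
  | cons s t ih =>
    intro acc
    simp only [List.foldl_cons, List.filterMap_cons, bStep_keep]
    cases h : keepL s with
    | none => simp [ih]
    | some c => simp [ih]

def nodd (a b : Char) : Prop := ¬(a = '.' ∧ b = '.')

def hInv (u : List Char) : Prop := u.head? ≠ some '.' ∧ List.IsChain nodd u

def dotPre (t : List Char) : List Char := if t.head? = some '.' then ['.'] else []

theorem gh_foldl_eq (t : List Char) : ∀ acc, acc ≠ [] → t.foldl gStep acc = t.foldl hStep acc := by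
  induction t with
  | nil => intro acc _; rfl
  | cons c r ih =>
    intro acc hne
    have hstep : gStep acc c = hStep acc c := by
      unfold gStep hStep; simp [hne]
    rw [List.foldl_cons, List.foldl_cons, hstep]
    by_cases h : c = '.' ∧ (acc = [] ∨ acc.getLast? = some '.')
    · rw [show hStep acc c = acc from by unfold hStep; simp [h]]
      exact ih acc hne
    · rw [show hStep acc c = acc ++ [c] from by unfold hStep; simp [h]]
      exact ih _ (by simp)

theorem g_foldl_prefix (t : List Char) : ∀ (p acc : List Char), acc ≠ [] → t.foldl gStep (p ++ acc) = p ++ t.foldl gStep acc := by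
  induction t with
  | nil => intro p acc _; rfl
  | cons c r ih =>
    intro p acc hne
    have hlast : (p ++ acc).getLast? = acc.getLast? := List.getLast?_append_of_ne_nil p hne
    rw [List.foldl_cons, List.foldl_cons]
    by_cases h : c = '.' ∧ acc.getLast? = some '.'
    · rw [show gStep (p ++ acc) c = p ++ acc from by unfold gStep; simp [hlast, h],
          show gStep acc c = acc from by unfold gStep; simp [h]]
      exact ih p acc hne
    · rw [show gStep (p ++ acc) c = p ++ (acc ++ [c]) from by unfold gStep; simp [hlast, h],
          show gStep acc c = acc ++ [c] from by unfold gStep; simp [h]]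
      exact ih p _ (by simp)

theorem g_foldl_dot (t : List Char) : t.foldl gStep ['.'] = '.' :: t.foldl hStep [] := by
  induction t with
  | nil => rfl
  | cons c r ih =>
    rw [List.foldl_cons, List.foldl_cons]
    by_cases h : c = '.'
    · rw [show gStep ['.'] c = ['.'] from by unfold gStep; simp [h],
          show hStep [] c = [] from by unfold hStep; simp [h]]
      exact ih
    · rw [show gStep ['.'] c = ['.', c] from by unfold gStep; simp [h],
          show hStep [] c = [c] from by unfold hStep; simp [h]]
      have := g_foldl_prefix r ['.'] [c] (by simp)
      simp only [List.cons_append, List.nil_append] at this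
      rw [this, gh_foldl_eq r [c] (by simp)]

theorem g_foldl_nil (t : List Char) : t.foldl gStep [] = dotPre t ++ t.foldl hStep [] := by
  cases t with
  | nil => rfl
  | cons c r =>
    rw [List.foldl_cons, List.foldl_cons]
    by_cases h : c = '.'
    · subst h
      rw [show gStep [] '.' = ['.'] from by decide, show hStep [] '.' = [] from by decide]
      rw [g_foldl_dot]
      simp [dotPre]
    · rw [show gStep [] c = [c] from by unfold gStep; simp,
          show hStep [] c = [c] from by unfold hStep; simp [h]]
      rw [gh_foldl_eq r [c] (by simp)]
      simp [dotPre, h]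

theorem g_absorb (a : List Char) : gStep (gStep a '.') '.' = gStep a '.' := by
  unfold gStep
  by_cases h : a.getLast? = some '.'
  · simp [h]
  · simp [h]

theorem g_foldl_replicate (j : Nat) (hj : 1 ≤ j) (a : List Char) :
    (List.replicate j '.').foldl gStep a = gStep a '.' := by
  induction j generalizing a with
  | zero => omega
  | succ n ih =>
    rw [List.replicate_succ, List.foldl_cons]
    rcases Nat.eq_or_lt_of_le (Nat.one_le_iff_ne_zero.mpr (by omega) : 1 ≤ n + 1) with h | h
    · have : n = 0 := by omega
      subst this; rfl
    · have hn : 1 ≤ n := by omega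
      rw [ih hn, g_absorb]

theorem hInv_step (acc : List Char) (c : Char) (h : hInv acc) : hInv (hStep acc c) := by
  obtain ⟨hh, hc⟩ := h
  unfold hStep
  by_cases hcond : c = '.' ∧ (acc = [] ∨ acc.getLast? = some '.')
  · simp only [hcond]; exact ⟨hh, hc⟩
  · simp only [hcond, if_neg, not_false_iff]
    constructor
    · cases acc with
      | nil =>
        simp only [List.nil_append, List.head?_cons, ne_eq, Option.some.injEq]
        intro hceq; exact hcond ⟨hceq, Or.inl rfl⟩
      | cons a r => simpa using hh
    · rw [List.isChain_append]
      refine ⟨hc, by simp, ?_⟩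
      intro x hx y hy
      simp only [List.head?_cons, Option.mem_def, Option.some.injEq] at hy
      subst hy
      intro ⟨hx', hc'⟩
      exact hcond ⟨hc', Or.inr (by rw [← hx']; exact hx)⟩

theorem hInv_foldl (t : List Char) : ∀ acc, hInv acc → hInv (t.foldl hStep acc) := by
  induction t with
  | nil => intro acc h; exact h
  | cons c r ih => intro acc h; exact ih _ (hInv_step acc c h)

theorem go_spec (o : Char) (os new : List Char) :
    ∀ (fuel : Nat) (l acc : List Char), l.length ≤ fuel →
      PySem.Chars.replace.go (o :: os) new fuel l acc = acc.reverse ++ replRef o os new l := by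
  intro fuel
  induction fuel with
  | zero =>
    intro l acc h
    have : l = [] := by cases l <;> simp_all
    subst this
    simp [PySem.Chars.replace.go, replRef]
  | succ n ih =>
    intro l acc h
    cases l with
    | nil => simp [PySem.Chars.replace.go, replRef]
    | cons c t =>
      rw [PySem.Chars.replace.go]
      by_cases hp : (o :: os).isPrefixOf (c :: t)
      · rw [if_pos hp, replRef, if_pos hp]
        have hlen : (List.drop (o :: os).length (c :: t)).length ≤ n := by
          simp only [List.length_drop, List.length_cons] at *
          omega
        rw [ih _ _ hlen]
        simp [List.drop_succ_cons]
      · rw [if_neg hp, replRef, if_neg hp]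
        rw [ih t (c :: acc) (by simp at h; omega)]
        simp

theorem replace_cons (s : List Char) (o : Char) (os new : List Char) :
    PySem.Chars.replace s (o :: os) new = replRef o os new s := by
  unfold PySem.Chars.replace
  rw [if_neg (by simp)]
  exact go_spec o os new s.length s [] (le_refl _)

theorem replace_dot_dot (s : List Char) : PySem.Chars.replace s ['.'] ['.'] = s := by
  rw [replace_cons]
  induction s with
  | nil => rw [replRef]
  | cons c t ih =>
    rw [replRef]
    by_cases hp : (['.'] : List Char).isPrefixOf (c :: t)
    · have hc : c = '.' := by
        rw [List.isPrefixOf_iff_prefix] at hp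
        rcases hp with ⟨r, hr⟩
        simpa using congrArg List.head? hr.symm
      rw [if_pos hp]
      simp only [List.length_nil, List.drop_zero, ih]
      rw [hc]; rfl
    · rw [if_neg hp, ih]

theorem rep_prefix_iff (m j : Nat) (r : List Char) (hr : r.head? ≠ some '.') :
    List.replicate m '.' <+: List.replicate j '.' ++ r ↔ m ≤ j := by
  constructor
  · intro h
    by_contra hmj
    have hjm : j < m := by omega
    have heq : List.replicate m '.' = List.replicate j '.' ++ List.replicate (m - j) '.' := by
      rw [List.replicate_append_replicate]; congr 1; omega
    rw [heq] at h
    have htail : List.replicate (m - j) '.' <+: r := (List.prefix_append_right_inj _).mp h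
    have hmj1 : 1 ≤ m - j := by omega
    rcases htail with ⟨q, hq⟩
    have : r.head? = some '.' := by
      rw [← hq]
      cases hmk : m - j with
      | zero => omega
      | succ k => simp [List.replicate_succ]
    exact hr this
  · intro h
    have hpre : List.replicate m '.' <+: List.replicate j '.' :=
      ⟨List.replicate (j - m) '.', by rw [List.replicate_append_replicate]; congr 1; omega⟩
    exact hpre.trans (List.prefix_append _ _)

theorem replRef_nil (m : Nat) : replRef '.' (List.replicate m '.') ['.'] [] = [] := by
  rw [replRef]

theorem replRef_cons_ne (m : Nat) (c : Char) (t : List Char) (hc : c ≠ '.') :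
    replRef '.' (List.replicate m '.') ['.'] (c :: t) = c :: replRef '.' (List.replicate m '.') ['.'] t := by
  rw [replRef, if_neg]
  rw [List.isPrefixOf_iff_prefix]
  intro h
  exact hc ((List.cons_prefix_cons.mp h).1).symm

theorem replRef_head (m : Nat) (r : List Char) (hr : r.head? ≠ some '.') :
    (replRef '.' (List.replicate m '.') ['.'] r).head? ≠ some '.' := by
  cases r with
  | nil => rw [replRef_nil]; simp
  | cons c t =>
    have hc : c ≠ '.' := by simpa using hr
    rw [replRef_cons_ne m c t hc]
    simpa using hc

theorem replRef_run_lt (m : Nat) (r : List Char) (hr : r.head? ≠ some '.') :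
    ∀ j, j < m + 1 →
    replRef '.' (List.replicate m '.') ['.'] (List.replicate j '.' ++ r)
      = List.replicate j '.' ++ replRef '.' (List.replicate m '.') ['.'] r := by
  intro j
  induction j with
  | zero => intro _; simp
  | succ n ih =>
    intro hj
    rw [List.replicate_succ, List.cons_append, replRef, if_neg]
    · rw [ih (by omega)]
      simp
    · rw [List.isPrefixOf_iff_prefix]
      intro h
      have := (List.cons_prefix_cons.mp h).2
      rw [rep_prefix_iff m n r hr] at this
      omega

theorem replRef_run_eq (m : Nat) (r : List Char) (hr : r.head? ≠ some '.') :
    replRef '.' (List.replicate m '.') ['.'] (List.replicate (m + 1) '.' ++ r)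
      = '.' :: replRef '.' (List.replicate m '.') ['.'] r := by
  rw [List.replicate_succ, List.cons_append, replRef, if_pos]
  · rw [List.drop_left]
    rfl
  · rw [List.isPrefixOf_iff_prefix, List.cons_prefix_cons]
    exact ⟨rfl, (rep_prefix_iff m m r hr).mpr (le_refl m)⟩

theorem boundary_no_run (m : Nat) (w : List Char) (hw : w.head? ≠ some '.')
    (hnw : ¬ List.replicate (m + 1) '.' <:+: w) :
    ∀ j, j < m + 1 → ¬ List.replicate (m + 1) '.' <:+: (List.replicate j '.' ++ w) := by
  intro j
  induction j with
  | zero => intro _; simpa using hnw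
  | succ n ih =>
    intro hj
    rw [show List.replicate (n + 1) '.' ++ w = '.' :: (List.replicate n '.' ++ w) from by
      rw [List.replicate_succ]; rfl]
    intro hinf
    rw [List.infix_cons_iff] at hinf
    rcases hinf with hpre | hinf
    · rw [List.replicate_succ, List.cons_prefix_cons] at hpre
      have := (rep_prefix_iff m n w hw).mp hpre.2
      omega
    · exact ih (by omega) hinf

theorem head?_dropWhile_dot (l : List Char) :
    ∀ c, (l.dropWhile (fun x => x == '.')).head? = some c → c ≠ '.' := by
  induction l with
  | nil => simp
  | cons a t ih =>
    intro c h
    rw [List.dropWhile_cons] at h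
    by_cases hp : (a == '.') = true
    · rw [if_pos hp] at h; exact ih c h
    · rw [if_neg hp] at h
      simp only [List.head?_cons, Option.some.injEq] at h
      subst h; simpa using hp

theorem takeWhile_dot_eq (l : List Char) :
    l.takeWhile (fun x => x == '.') = List.replicate (l.takeWhile (fun x => x == '.')).length '.' := by
  rw [List.eq_replicate_iff]
  refine ⟨rfl, ?_⟩
  intro b hb
  have := List.mem_takeWhile_imp hb
  simpa using this

theorem run_decomp (s : List Char) (hs : s.head? = some '.') :
    ∃ j r, 1 ≤ j ∧ s = List.replicate j '.' ++ r ∧ r.head? ≠ some '.' ∧ r.length + j = s.length := by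
  refine ⟨(s.takeWhile (fun x => x == '.')).length, s.dropWhile (fun x => x == '.'), ?_, ?_, ?_, ?_⟩
  · cases s with
    | nil => simp at hs
    | cons c t =>
      have : c = '.' := by simpa using hs
      subst this
      rw [List.takeWhile_cons_of_pos (by simp)]
      simp
  · conv_lhs => rw [← List.takeWhile_append_dropWhile (p := fun x => x == '.') (l := s)]
    rw [← takeWhile_dot_eq]
  · intro h
    exact (head?_dropWhile_dot s '.' h) rfl
  · have := congrArg List.length (List.takeWhile_append_dropWhile (p := fun x => x == '.') (l := s))
    simp only [List.length_append] at this
    omega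

theorem replace_step (m : Nat) (hm : 1 ≤ m) :
    ∀ (n : Nat) (s : List Char), s.length ≤ n → ¬ List.replicate (m + 2) '.' <:+: s →
      (¬ List.replicate (m + 1) '.' <:+: replRef '.' (List.replicate m '.') ['.'] s) ∧
      (∀ a, (replRef '.' (List.replicate m '.') ['.'] s).foldl gStep a = s.foldl gStep a) := by
  intro n
  induction n with
  | zero =>
    intro s hlen _
    have : s = [] := by cases s <;> simp_all
    subst this
    rw [replRef_nil]
    exact ⟨by simp, fun a => rfl⟩
  | succ n ih =>
    intro s hlen hno
    cases hhead : s.head? with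
    | none =>
      have : s = [] := by cases s <;> simp_all
      subst this
      rw [replRef_nil]
      exact ⟨by simp, fun a => rfl⟩
    | some c =>
      by_cases hc : c = '.'
      · subst hc
        obtain ⟨j, r, hj1, hdec, hrh, hlen'⟩ := run_decomp s hhead
        have hrlen : r.length ≤ n := by omega
        have hrno : ¬ List.replicate (m + 2) '.' <:+: r := by
          intro h
          exact hno (hdec ▸ h.trans (List.suffix_append _ _).isInfix)
        obtain ⟨ihr1, ihr2⟩ := ih r hrlen hrno
        have hjm : j ≤ m + 1 := by
          by_contra hgt
          apply hno
          rw [hdec]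
          have : List.replicate (m + 2) '.' <+: List.replicate j '.' ++ r :=
            (rep_prefix_iff (m + 2) j r hrh).mpr (by omega)
          exact this.isInfix
        rcases Nat.lt_or_ge j (m + 1) with hlt | hge
        · -- j < m + 1 : the run is copied verbatim
          rw [hdec, replRef_run_lt m r hrh j hlt]
          constructor
          · exact boundary_no_run m (replRef '.' (List.replicate m '.') ['.'] r)
              (replRef_head m r hrh) ihr1 j hlt
          · intro a
            rw [List.foldl_append, List.foldl_append, g_foldl_replicate j hj1 a, ihr2]
        · -- j = m + 1 : the run collapses to a single dot
          have hje : j = m + 1 := by omega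
          subst hje
          rw [hdec, replRef_run_eq m r hrh]
          constructor
          · intro h
            rw [List.infix_cons_iff] at h
            rcases h with hpre | hinf
            · rw [List.replicate_succ, List.cons_prefix_cons] at hpre
              rcases hpre.2 with ⟨q, hq⟩
              have : (replRef '.' (List.replicate m '.') ['.'] r).head? = some '.' := by
                rw [← hq]
                cases hmk : m with
                | zero => omega
                | succ k => simp [List.replicate_succ]
              exact replRef_head m r hrh this
            · exact ihr1 hinf
          · intro a
            rw [List.foldl_cons, ihr2, List.foldl_append,
                g_foldl_replicate (m + 1) (by omega) a]
      · -- head is not a dot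
        cases s with
        | nil => simp at hhead
        | cons c' t =>
          have hcne : c' ≠ '.' := by
            have : c' = c := by simpa using hhead
            rw [this]; exact hc
          rw [replRef_cons_ne m c' t hcne]
          have htno : ¬ List.replicate (m + 2) '.' <:+: t := by
            intro h
            exact hno (h.trans (List.infix_cons (List.infix_refl t)))
          obtain ⟨iht1, iht2⟩ := ih t (by simpa using hlen) htno
          constructor
          · intro h
            rw [List.infix_cons_iff] at h
            rcases h with hpre | hinf
            · rw [List.replicate_succ, List.cons_prefix_cons] at hpre
              exact hcne hpre.1.symm
            · exact iht1 hinf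
          · intro a
            rw [List.foldl_cons, List.foldl_cons, iht2]

theorem g_foldl_of_no_dd : ∀ (s a : List Char), ¬ (['.', '.'] <:+: s) →
    ¬(s.head? = some '.' ∧ a.getLast? = some '.') → s.foldl gStep a = a ++ s := by
  intro s
  induction s with
  | nil => intro a _ _; simp
  | cons c t ih =>
    intro a hdd hb
    have hstep : gStep a c = a ++ [c] := by
      unfold gStep
      rw [if_neg]
      intro ⟨h1, h2⟩
      exact hb ⟨by simp [h1], h2⟩
    rw [List.foldl_cons, hstep, ih (a ++ [c])]
    · simp
    · intro h
      exact hdd (h.trans (List.infix_cons (List.infix_refl t)))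
    · intro ⟨h1, h2⟩
      simp only [List.getLast?_append_of_ne_nil a (by simp : ([c] : List Char) ≠ []),
        List.getLast?_singleton, Option.some.injEq] at h2
      apply hdd
      cases t with
      | nil => simp at h1
      | cons d r =>
        have : d = '.' := by simpa using h1
        subst this; subst h2
        exact ⟨[], r, by simp⟩

theorem loop_collapses : ∀ (k : Nat) (s : List Char), ¬ List.replicate (k + 2) '.' <:+: s →
    (PySem.List.pyRange ((k : Int) + 1) 0 (-1)).foldl aReplStep s = s.foldl gStep [] := by
  intro k
  induction k with
  | zero =>
    intro s hno
    rw [PySem.List.pyRange_neg_one_cons (by norm_num), PySem.List.pyRange_neg_one_eq_nil (by norm_num)]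
    simp only [Int.cast_ofNat_Int, List.foldl_cons, List.foldl_nil]
    rw [show aReplStep s (0 + 1) = s from by
      unfold aReplStep
      norm_num
      exact replace_dot_dot s]
    rw [g_foldl_of_no_dd s [] (by simpa using hno) (by simp)]
    simp
  | succ k ih =>
    intro s hno
    have hrw : ((k + 1 : Nat) : Int) + 1 = ((k : Int) + 1) + 1 := by push_cast; ring
    rw [hrw, PySem.List.pyRange_neg_one_cons (by positivity), List.foldl_cons]
    have hstep : aReplStep s ((k : Int) + 1 + 1) = replRef '.' (List.replicate (k + 1) '.') ['.'] s := by
      unfold aReplStep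
      rw [show ((k : Int) + 1 + 1).toNat = k + 2 from by omega,
        show List.replicate (k + 2) '.' = '.' :: List.replicate (k + 1) '.' from by rw [List.replicate_succ]]
      exact replace_cons s _ _ _
    obtain ⟨h1, h2⟩ := replace_step (k + 1) (by omega) s.length s (le_refl _) hno
    rw [show (k : Int) + 1 + 1 - 1 = (k : Int) + 1 from by ring, hstep, ih _ h1]
    exact h2 []

def popDot (u : List Char) : List Char := if u.getLast? = some '.' then u.dropLast else u

theorem dropWhile_dot_of_head (l : List Char) (h : l.head? ≠ some '.') :
    l.dropWhile (fun c => List.contains ['.'] c) = l := by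
  cases l with
  | nil => rfl
  | cons c t =>
    rw [List.dropWhile_cons, if_neg]
    simp only [List.head?_cons, ne_eq, Option.some.injEq] at h
    simpa using h

theorem chain_last (u : List Char) (hc : List.IsChain nodd u) (hl : u.getLast? = some '.') :
    u.dropLast.getLast? ≠ some '.' := by
  have hne : u ≠ [] := by intro h; subst h; simp at hl
  have hu : u = u.dropLast ++ [u.getLast hne] := (List.dropLast_append_getLast hne).symm
  have hlast : u.getLast hne = '.' := by
    have := List.getLast?_eq_some_getLast (l := u) hne
    rw [this] at hl; simpa using hl
  intro hdd
  rw [hu, List.isChain_append] at hc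
  obtain ⟨-, -, hrel⟩ := hc
  exact hrel '.' hdd '.' (by simp [hlast]) ⟨rfl, rfl⟩

theorem strip_core (u : List Char) (hh : u.head? ≠ some '.') (hc : List.IsChain nodd u) :
    (List.dropWhile (fun c => List.contains ['.'] c) u.reverse).reverse = popDot u := by
  by_cases hl : u.getLast? = some '.'
  · have hne : u ≠ [] := by intro h; subst h; simp at hl
    have hu : u.reverse = '.' :: u.dropLast.reverse := by
      conv_lhs => rw [← List.dropLast_append_getLast hne]
      rw [List.reverse_append]
      have : u.getLast hne = '.' := by
        have := List.getLast?_eq_some_getLast (l := u) hne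
        rw [this] at hl; simpa using hl
      simp [this]
    rw [hu, List.dropWhile_cons, if_pos (by simp)]
    rw [dropWhile_dot_of_head _ (by rw [List.head?_reverse]; exact chain_last u hc hl)]
    simp [popDot, hl]
  · rw [dropWhile_dot_of_head _ (by rw [List.head?_reverse]; exact hl)]
    simp [popDot, hl]

theorem strip_eq_popDot (u : List Char) (hh : u.head? ≠ some '.') (hc : List.IsChain nodd u) :
    PySem.Chars.stripChars u ['.'] = popDot u := by
  show (List.dropWhile (fun c => List.contains ['.'] c)
      (List.dropWhile (fun c => List.contains ['.'] c) u).reverse).reverse = popDot u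
  rw [dropWhile_dot_of_head u hh]
  exact strip_core u hh hc

theorem strip_eq_popDot' (u : List Char) (hh : u.head? ≠ some '.') (hc : List.IsChain nodd u) :
    PySem.Chars.stripChars ('.' :: u) ['.'] = popDot u := by
  show (List.dropWhile (fun c => List.contains ['.'] c)
      (List.dropWhile (fun c => List.contains ['.'] c) ('.' :: u)).reverse).reverse = popDot u
  rw [List.dropWhile_cons, if_pos (by simp), dropWhile_dot_of_head u hh]
  exact strip_core u hh hc

theorem pad_eq : ∀ (n : Nat) (nid : List Char), 3 - nid.length ≤ n → padA nid = padB nid := by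
  intro n
  induction n with
  | zero =>
    intro nid h
    rw [padA, padB, if_neg (by omega), if_neg (by omega)]
  | succ n ih =>
    intro nid h
    rw [padA, padB]
    by_cases hlt : nid.length < 3
    · rw [if_pos hlt, if_pos hlt, lastD_eq]
      exact ih _ (by simp; omega)
    · rw [if_neg hlt, if_neg hlt]

theorem padB_of_long (z : List Char) (h : ¬ z.length < 3) : padB z = z := by
  rw [padB, if_neg h]

theorem head?_of_prefix (l₁ l₂ : List Char) (h : l₁ <+: l₂) (hne : l₁ ≠ []) : l₁.head? = l₂.head? := by
  rcases h with ⟨t, ht⟩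
  rw [← ht, List.head?_append_of_ne_nil _ hne]

theorem popDot_facts (u : List Char) (h : u.head? ≠ some '.' ∧ List.IsChain nodd u) :
    (popDot u).head? ≠ some '.' ∧ List.IsChain nodd (popDot u) ∧ (popDot u).getLast? ≠ some '.' := by
  obtain ⟨hh, hc⟩ := h
  unfold popDot
  by_cases hl : u.getLast? = some '.'
  · rw [if_pos hl]
    refine ⟨?_, hc.prefix (List.dropLast_prefix u), chain_last u hc hl⟩
    by_cases hd : u.dropLast = []
    · rw [hd]; simp
    · rw [head?_of_prefix _ _ (List.dropLast_prefix u) hd]; exact hh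
  · rw [if_neg hl]; exact ⟨hh, hc, hl⟩

theorem stage1_eq (u p : List Char) (hp : p = [] ∨ p = ['.'])
    (hh : u.head? ≠ some '.') (hc : List.IsChain nodd u) :
    (let R := p ++ u
     let n1 :=
       if R.length > 0 then
         let n0 :=
           if PySem.List.pyGetD R 0 'a' = '.' ∨ PySem.List.pyGetD R (-1) 'a' = '.' then
             PySem.Chars.stripChars R ['.']
           else R
         if n0.length = 0 then ['a'] else n0
       else R
     if n1.length = 0 then ['a'] else n1)
    = (if popDot u = [] then ['a'] else popDot u) := by
  by_cases hR : p ++ u = []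
  · have hpu : p = [] ∧ u = [] := by
      constructor <;> [exact List.eq_nil_of_append_eq_nil hR |>.1; exact List.eq_nil_of_append_eq_nil hR |>.2]
    rw [hpu.1, hpu.2]
    simp [popDot]
  · have hlen : (p ++ u).length > 0 := by
      cases hq : p ++ u with
      | nil => exact absurd hq hR
      | cons a b => simp
    simp only [hlen, if_pos]
    by_cases hcond : PySem.List.pyGetD (p ++ u) 0 'a' = '.' ∨ PySem.List.pyGetD (p ++ u) (-1) 'a' = '.'
    · rw [if_pos hcond]
      have hstrip : PySem.Chars.stripChars (p ++ u) ['.'] = popDot u := by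
        rcases hp with hp | hp
        · rw [hp, List.nil_append]; exact strip_eq_popDot u hh hc
        · rw [hp]; exact strip_eq_popDot' u hh hc
      rw [hstrip]
      by_cases hz : popDot u = []
      · simp [hz]
      · simp [List.length_eq_zero_iff, hz]
    · rw [if_neg hcond]
      push Not at hcond
      obtain ⟨hc0, hc1⟩ := hcond
      have hpnil : p = [] := by
        rcases hp with hp | hp
        · exact hp
        · exfalso
          apply hc0
          rw [headD_eq _ hR, hp]
          simp
      subst hpnil
      simp only [List.nil_append] at hc0 hc1 hR ⊢
      have hul : u.getLast? ≠ some '.' := fun hl => hc1 ((last_dot_iff u).mpr hl)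
      have hpop : popDot u = u := by unfold popDot; rw [if_neg hul]
      simp [hpop, List.length_eq_zero_iff, hR]

theorem stage2_eq (w : List Char) (_hne : w ≠ []) (hh : w.head? ≠ some '.')
    (hc : List.IsChain nodd w) (hl : w.getLast? ≠ some '.') :
    (if w.length ≥ 16 then
       let y := PySem.Chars.slice w none (some 15)
       if PySem.List.pyGetD y (-1) 'a' = '.' then PySem.Chars.stripChars y ['.'] else y
     else w)
    = (let o3 := w.take 15
       if o3.getLast? = some '.' then o3.dropLast else o3) := by
  have hslice : PySem.Chars.slice w none (some 15) = w.take 15 := by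
    have h15 : ((15 : Int)).toNat = 15 := rfl
    rw [PySem.Chars.slice_eq_listSlice, PySem.List.slice_to (xs := w) (b := 15) (by norm_num), h15]
  by_cases h16 : w.length ≥ 16
  · rw [if_pos h16]
    simp only [hslice]
    have hyne : w.take 15 ≠ [] := by
      intro h
      have h2 := congrArg List.length h
      rw [List.length_take] at h2
      simp only [List.length_nil] at h2
      omega
    have hyh : (w.take 15).head? ≠ some '.' := by
      rw [head?_of_prefix _ _ (List.take_prefix 15 w) hyne]; exact hh
    have hyc : List.IsChain nodd (w.take 15) := hc.prefix (List.take_prefix 15 w)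
    by_cases hy : (w.take 15).getLast? = some '.'
    · rw [if_pos ((last_dot_iff _).mpr hy), strip_eq_popDot _ hyh hyc]
      unfold popDot
      rw [if_pos hy]
    · rw [if_neg (fun hd => hy ((last_dot_iff _).mp hd)), if_neg hy]
  · rw [if_neg h16]
    have htake : w.take 15 = w := List.take_of_length_le (by omega)
    simp only [htake]
    rw [if_neg hl]

def step45A (R : List Char) : List Char :=
  let n1 :=
    if R.length > 0 then
      let n0 :=
        if PySem.List.pyGetD R 0 'a' = '.' ∨ PySem.List.pyGetD R (-1) 'a' = '.' then
          PySem.Chars.stripChars R ['.']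
        else R
      if n0.length = 0 then ['a'] else n0
    else R
  if n1.length = 0 then ['a'] else n1

def step6A (w : List Char) : List Char :=
  if w.length ≥ 16 then
    let y := PySem.Chars.slice w none (some 15)
    if PySem.List.pyGetD y (-1) 'a' = '.' then PySem.Chars.stripChars y ['.'] else y
  else w

def step7A (z : List Char) : List Char :=
  if z.length ≤ 2 then padA z else z

def wB (u : List Char) : List Char := if popDot u = [] then ['a'] else popDot u

def tailB (w : List Char) : List Char :=
  let o3 := w.take 15
  if o3.getLast? = some '.' then o3.dropLast else o3

def backB (u : List Char) : List Char :=
  let o1 := if u ≠ [] ∧ u.getLast? = some '.' then u.dropLast else u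
  let o2 := if o1 = [] then ['a'] else o1
  let o3 := o2.take 15
  padB (if o3.getLast? = some '.' then o3.dropLast else o3)

theorem step45A_eq (u p : List Char) (hp : p = [] ∨ p = ['.'])
    (hh : u.head? ≠ some '.') (hc : List.IsChain nodd u) :
    step45A (p ++ u) = wB u := by
  unfold step45A wB
  exact stage1_eq u p hp hh hc

theorem step6A_eq (w : List Char) (hne : w ≠ []) (hh : w.head? ≠ some '.')
    (hc : List.IsChain nodd w) (hl : w.getLast? ≠ some '.') :
    step6A w = tailB w := by
  unfold step6A tailB
  exact stage2_eq w hne hh hc hl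

theorem step7A_eq (z : List Char) : step7A z = padB z := by
  unfold step7A
  by_cases h : z.length ≤ 2
  · rw [if_pos h]
    exact pad_eq 3 z (by omega)
  · rw [if_neg h, padB_of_long z (by omega)]

theorem backB_eq (u : List Char) : backB u = padB (tailB (wB u)) := by
  unfold backB tailB wB popDot
  by_cases hl : u.getLast? = some '.'
  · have hne : u ≠ [] := by intro h; subst h; simp at hl
    rw [if_pos ⟨hne, hl⟩, if_pos hl]
  · rw [if_neg (fun h => hl h.2), if_neg hl]

theorem wB_facts (u : List Char) (h : u.head? ≠ some '.' ∧ List.IsChain nodd u) :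
    wB u ≠ [] ∧ (wB u).head? ≠ some '.' ∧ List.IsChain nodd (wB u) ∧ (wB u).getLast? ≠ some '.' := by
  obtain ⟨h1, h2, h3⟩ := popDot_facts u h
  unfold wB
  by_cases hz : popDot u = []
  · rw [if_pos hz]
    refine ⟨by simp, by simp, by simp, by simp⟩
  · rw [if_neg hz]
    exact ⟨hz, h1, h2, h3⟩

set_option maxHeartbeats 1000000 in
theorem main_eq (input_id : String) : solution input_id = solution_alt input_id := by
  have hA : solution input_id = String.ofList (step7A (step6A (step45A
      ((PySem.List.pyRange (((input_id.toList.foldl aFilterStep []).length : Int) + 1) 0 (-1)).foldl aReplStep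
        (PySem.Chars.join [] ((input_id.toList.foldl aFilterStep []).map (fun c => [c]))))))) := by
    simp only [solution, step7A, step6A, step45A]
  have hB : solution_alt input_id = String.ofList (backB (input_id.toList.foldl bStep [])) := by
    simp only [solution_alt, backB]
  rw [hA, hB]
  have hfoldA : input_id.toList.foldl aFilterStep [] = List.filterMap keepL input_id.toList := by
    rw [afold_eq]; simp
  set t := List.filterMap keepL input_id.toList with ht
  have hjoin : PySem.Chars.join [] (t.map (fun c => [c])) = t := PySem.Chars.join_nil_singletons t
  have hfoldB : input_id.toList.foldl bStep [] = List.foldl hStep [] t := bfold_eq input_id.toList []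
  set u := List.foldl hStep [] t with hu
  have hinv : hInv u := hInv_foldl t [] ⟨by simp, by simp⟩
  have hbound : ¬ List.replicate (t.length + 2) '.' <:+: t := by
    intro h
    have := h.length_le
    simp only [List.length_replicate] at this
    omega
  have hloop : (PySem.List.pyRange ((t.length : Int) + 1) 0 (-1)).foldl aReplStep t = dotPre t ++ u := by
    rw [loop_collapses t.length t hbound, g_foldl_nil]
  have hdp : dotPre t = [] ∨ dotPre t = ['.'] := by
    unfold dotPre; split_ifs <;> simp
  rw [hfoldA, hjoin, hloop, hfoldB]
  refine congrArg String.ofList ?_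
  rw [step45A_eq u (dotPre t) hdp hinv.1 hinv.2]
  obtain ⟨w1, w2, w3, w4⟩ := wB_facts u hinv
  rw [step6A_eq _ w1 w2 w3 w4, step7A_eq, backB_eq]

-- ===== VERDICT (by name: the statement is the Claim_ definition above) =====
theorem solution_spec : Claim_equal_solution := by
  intro input_id _
  unfold Spec_solution
  exact main_eq input_id
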